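-- pv_equiv track=rewrite | github.com/ayoubboudhrioua/cyber_swiss_knife | modules/security_auditor/cert_checker.py | _verify_hostname
-- ===== SOURCE A (Python) =====
-- def _verify_hostname(hostname, cn, san_list):
--     """Verify hostname matches certificate"""
--     if hostname == cn:
--         return True
--
--     if hostname in san_list:
--         return True
--
--     # Check wildcards
--     for san in san_list:
--         if san.startswith('*.'):
--             domain = san[2:]
--             if hostname.endswith(domain):
--                 return True
--
--     return False
-- ===== SOURCE B (Python) =====
-- def _verify_hostname(hostname, cn, san_list):
--     """Verify hostname matches certificate"""
--     if hostname == cn: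
--         return True
--     # Invert the matching: hash the SAN entries once, then probe the set with the
--     # candidate wildcard pattern '*.'+suffix for each suffix length that actually
--     # occurs among the '*.'-shaped SAN entries.
--     sans = set(san_list)
--     if hostname in sans:
--         return True
--     n = len(hostname)
--     lengths = {len(s) - 2 for s in san_list if s.startswith('*.')}
--     return any(l <= n and '*.' + hostname[n - l:] in sans for l in lengths)
-- ===== Notes on version B (the rewrite author's own statement) =====
-- stated objective: alternative
-- what changed: Inverts the matching: instead of a membership scan of the SAN list followed by a per-SAN startswith/endswith wildcard loop, B hashes the SAN entries into a set once, collects the set of wildcard-domain lengths, and probes the SAN set with the candidate pattern '*.'+suffix of the hostname for each occurring length.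
import Mathlib
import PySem

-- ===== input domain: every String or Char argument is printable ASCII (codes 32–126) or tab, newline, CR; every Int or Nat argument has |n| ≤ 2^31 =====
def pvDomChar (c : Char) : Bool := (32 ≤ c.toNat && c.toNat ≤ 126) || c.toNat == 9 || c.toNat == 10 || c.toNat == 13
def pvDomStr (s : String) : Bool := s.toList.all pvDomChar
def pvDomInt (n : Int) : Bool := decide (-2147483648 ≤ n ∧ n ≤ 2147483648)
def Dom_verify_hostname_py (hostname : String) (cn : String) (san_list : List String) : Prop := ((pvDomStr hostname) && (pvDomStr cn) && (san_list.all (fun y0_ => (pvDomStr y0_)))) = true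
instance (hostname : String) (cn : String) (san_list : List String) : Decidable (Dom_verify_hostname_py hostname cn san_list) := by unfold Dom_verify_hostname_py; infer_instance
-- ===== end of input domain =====

-- B inverts the matching: it hashes the SAN entries into a set once, collects the wildcard-domain lengths that
-- occur, and probes the set with the candidate pattern '*.'+suffix of the hostname for each such length, instead
-- of A's per-SAN membership scan and startswith/endswith wildcard loop (alternative algorithm; proved equal).


-- ===== PORT A =====
-- A's wildcard loop: for san in san_list: if san.startswith('*.'): domain = san[2:]; if hostname.endswith(domain): return True
def pvAWildLoop (hostname : String) : List String → Bool
  | [] => false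
  | san :: rest =>
    if PySem.Str.startswith san "*." then
      let domain := PySem.Str.slice san (some 2) none
      if PySem.Str.endswith hostname domain then true
      else pvAWildLoop hostname rest
    else pvAWildLoop hostname rest

def verify_hostname_py (hostname : String) (cn : String) (san_list : List String) : Bool :=
  if hostname == cn then true
  else if san_list.contains hostname then true
  else pvAWildLoop hostname san_list

-- ===== PORT B =====
-- sans = set(san_list); hostname in sans?; lengths = {len(s)-2 for s in san_list if s.startswith('*.')};
-- any(l <= n and '*.' + hostname[n-l:] in sans for l in lengths)
def verify_hostname_py_alt (hostname : String) (cn : String) (san_list : List String) : Bool :=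
  if hostname == cn then true
  else
    let sans := PySem.Set.ofList san_list
    if PySem.Set.contains sans hostname then true
    else
      let n := PySem.Str.len hostname
      let lengths : PySem.Set Int := PySem.Set.ofList
        ((san_list.filter (fun s => PySem.Str.startswith s "*.")).map
          (fun s => PySem.Str.len s - 2))
      lengths.any (fun l => decide (l ≤ n) &&
        PySem.Set.contains sans ("*." ++ PySem.Str.slice hostname (some (n - l)) none))

-- ===== PRECONDITION & SPEC =====
def Spec_verify_hostname_py (hostname : String) (cn : String) (san_list : List String) (out : Bool) : Prop := out = verify_hostname_py_alt hostname cn san_list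
instance (hostname : String) (cn : String) (san_list : List String) (out : Bool) : Decidable (Spec_verify_hostname_py hostname cn san_list out) := by unfold Spec_verify_hostname_py; infer_instance

-- ===== CLAIM (what is proved, stated in full; the proofs are below) =====
def Claim_equal_verify_hostname_py : Prop := ∀ (hostname : String) (cn : String) (san_list : List String), Dom_verify_hostname_py hostname cn san_list → Spec_verify_hostname_py hostname cn san_list (verify_hostname_py hostname cn san_list)

-- ===== LEMMAS AND PROOFS =====
-- B's probe pattern '*.' + hostname[m:] spelled out as characters.
theorem probe_toList (hostname : String) (m : Nat) :
    ("*." ++ PySem.Str.slice hostname (some (m : Int)) none).toList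
      = '*' :: '.' :: hostname.toList.drop m := by
  have hu : (PySem.Str.slice hostname (some (m : Int)) none).toList
      = hostname.toList.drop m := by simp [pysem]
  rw [String.toList_append, hu]; rfl

-- Every probe pattern passes A's per-SAN wildcard test.
theorem probe_sw (hostname : String) (m : Nat) :
    PySem.Str.startswith ("*." ++ PySem.Str.slice hostname (some (m : Int)) none) "*." = true := by
  rw [PySem.Str.startswith_eq, PySem.Chars.startswith_iff, probe_toList]
  exact ⟨hostname.toList.drop m, rfl⟩

theorem probe_ew (hostname : String) (m : Nat) :
    PySem.Str.endswith hostname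
      (PySem.Str.slice ("*." ++ PySem.Str.slice hostname (some (m : Int)) none)
        (some 2) none) = true := by
  have hs : (PySem.Str.slice ("*." ++ PySem.Str.slice hostname (some (m : Int)) none)
      (some 2) none).toList = hostname.toList.drop m := by
    rw [PySem.Str.toList_slice, PySem.Chars.slice_eq_listSlice, probe_toList]
    simp [PySem.List.slice]
  rw [PySem.Str.endswith_eq, PySem.Chars.endswith_iff, hs]
  exact List.drop_suffix m hostname.toList

-- Some SAN passes A's wildcard test iff some occurring wildcard-domain length yields a probe hit.
theorem wild_iff (hostname : String) (san_list : List String) :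
    (∃ s ∈ san_list, PySem.Str.startswith s "*." = true ∧
        PySem.Str.endswith hostname (PySem.Str.slice s (some 2) none) = true) ↔
      (∃ l ∈ ((san_list.filter (fun s => PySem.Str.startswith s "*.")).map
          (fun s => PySem.Str.len s - 2)), l ≤ PySem.Str.len hostname ∧
        ("*." ++ PySem.Str.slice hostname (some (PySem.Str.len hostname - l)) none) ∈ san_list) := by
  constructor
  · rintro ⟨s, hs, hsw, hew⟩
    rw [PySem.Str.startswith_eq, PySem.Chars.startswith_iff] at hsw
    rw [PySem.Str.endswith_eq, PySem.Chars.endswith_iff] at hew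
    obtain ⟨rest, hrest⟩ := hsw
    have hx : s.toList = '*' :: '.' :: rest := by rw [← hrest]; rfl
    have ht2 : (PySem.Str.slice s (some 2) none).toList = rest := by
      rw [PySem.Str.toList_slice, PySem.Chars.slice_eq_listSlice, hx]
      simp [PySem.List.slice]
    rw [ht2] at hew
    have hle : rest.length ≤ hostname.toList.length := hew.length_le
    have hsl : s.toList.length = rest.length + 2 := by rw [hx]; simp
    have h1 := hostname.length_toList
    have h2 := s.length_toList
    refine ⟨(rest.length : Int), ?_, ?_, ?_⟩
    · rw [List.mem_map]
      refine ⟨s, List.mem_filter.mpr ⟨hs, ?_⟩, ?_⟩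
      · rw [PySem.Str.startswith_eq, PySem.Chars.startswith_iff, hx]
        exact ⟨rest, rfl⟩
      · simp only [PySem.Str.len_eq]; omega
    · simp only [PySem.Str.len_eq]; omega
    · have hcast : PySem.Str.len hostname - (rest.length : Int)
          = ((hostname.toList.length - rest.length : Nat) : Int) := by
        simp only [PySem.Str.len_eq]; omega
      have hdrop := List.suffix_iff_eq_drop.mp hew
      have : ("*." ++ PySem.Str.slice hostname
          (some (PySem.Str.len hostname - (rest.length : Int))) none) = s := by
        apply String.ext_iff.mpr
        rw [hcast, probe_toList, hx, ← hdrop]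
      rw [this]; exact hs
  · rintro ⟨l, _, hln, hmem⟩
    have h0 : (0 : Int) ≤ PySem.Str.len hostname - l := by
      simp only [PySem.Str.len_eq] at hln ⊢; omega
    obtain ⟨m, hm⟩ := Int.eq_ofNat_of_zero_le h0
    rw [hm] at hmem
    exact ⟨_, hmem, probe_sw hostname m, probe_ew hostname m⟩

-- A's wildcard loop is the 'any' of its per-element test.
theorem wildloop_eq_any (hostname : String) (l : List String) :
    pvAWildLoop hostname l = l.any (fun san =>
      PySem.Str.startswith san "*." &&
      PySem.Str.endswith hostname (PySem.Str.slice san (some 2) none)) := by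
  induction l with
  | nil => rfl
  | cons san rest ih =>
    cases hsw : PySem.Str.startswith san "*." <;>
    cases hew : PySem.Str.endswith hostname (PySem.Str.slice san (some 2) none) <;>
      simp_all [pvAWildLoop]

-- The non-CN branches of A and B agree.
theorem branch_eq (hostname : String) (san_list : List String) :
    (if san_list.contains hostname then true else pvAWildLoop hostname san_list) =
      (if PySem.Set.contains (PySem.Set.ofList san_list) hostname then true
       else (PySem.Set.ofList ((san_list.filter (fun s => PySem.Str.startswith s "*.")).map
            (fun s => PySem.Str.len s - 2)) : PySem.Set Int).any (fun l =>
          decide (l ≤ PySem.Str.len hostname) &&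
          PySem.Set.contains (PySem.Set.ofList san_list)
            ("*." ++ PySem.Str.slice hostname (some (PySem.Str.len hostname - l)) none))) := by
  by_cases hm : hostname ∈ san_list
  · rw [List.contains_iff_mem.mpr hm,
      (PySem.Set.contains_iff _ _).mpr ((PySem.Set.mem_ofList _ _).mpr hm)]
    rfl
  · have h1 : san_list.contains hostname = false :=
      Bool.eq_false_iff.mpr (fun hc => hm (List.contains_iff_mem.mp hc))
    have h2 : PySem.Set.contains (PySem.Set.ofList san_list) hostname = false :=
      Bool.eq_false_iff.mpr
        (fun hc => hm ((PySem.Set.mem_ofList _ _).mp ((PySem.Set.contains_iff _ _).mp hc)))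
    rw [h1, h2, wildloop_eq_any, Bool.eq_iff_iff]
    simp only [Bool.ite_eq_true_distrib, List.any_eq_true, Bool.and_eq_true,
      decide_eq_true_eq, PySem.Set.contains_iff, PySem.Set.mem_ofList]
    exact wild_iff hostname san_list

-- ===== VERDICT (by name: the statement is the Claim_ definition above) =====
theorem verify_hostname_py_spec : Claim_equal_verify_hostname_py := by
  intro hostname cn san_list _
  unfold Spec_verify_hostname_py verify_hostname_py verify_hostname_py_alt
  by_cases hcn : hostname == cn
  · simp [hcn]
  · simp only [hcn, Bool.false_eq_true, ite_false]
    exact branch_eq hostname san_list
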